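-- pv_equiv track=rewrite | github.com/yuseung0429/Algorithm | Programmers/Python/solved/Problem_120896.py | solution
-- ===== SOURCE A (Python) =====
-- def solution(s):
--     dic = {}
--     list = []
--     for i in s :
--         if i in dic:
--             dic[i] += 1
--         else :
--             dic[i] = 1
--     for k, v in dic.items() :
--         if v == 1 :
--             list.append(k)
--     list.sort()
--     return "".join(list)
-- ===== SOURCE B (Python) =====
-- def solution(s):
--     t = sorted(s)
--     out = []
--     while t:
--         c = t[0]
--         k = 1
--         while k < len(t) and t[k] == c:
--             k += 1
--         if k == 1:
--             out.append(c)
--         t = t[k:]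
--     return "".join(out)
-- ===== Notes on version B (the rewrite author's own statement) =====
-- stated objective: alternative
-- what changed: Replaced the dict frequency count + separate final sort with a sort-first, group-runs scan: sort the characters once, then walk the sorted list splitting it into runs of equal characters, keeping exactly the characters whose run has length 1 (already in sorted order, so no final sort).
import Mathlib
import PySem

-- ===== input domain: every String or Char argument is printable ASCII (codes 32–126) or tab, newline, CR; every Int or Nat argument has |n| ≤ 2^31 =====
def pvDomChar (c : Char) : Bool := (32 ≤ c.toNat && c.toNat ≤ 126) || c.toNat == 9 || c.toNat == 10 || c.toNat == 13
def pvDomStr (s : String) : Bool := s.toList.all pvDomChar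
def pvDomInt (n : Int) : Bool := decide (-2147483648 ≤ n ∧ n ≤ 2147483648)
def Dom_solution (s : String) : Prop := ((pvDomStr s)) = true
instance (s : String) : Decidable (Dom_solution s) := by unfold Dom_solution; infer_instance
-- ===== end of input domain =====

-- B replaces the dict frequency count + final sort by a sort-first run scan; alternative decomposition, same cost.

-- ===== PORT A =====
def solution (s : String) : String :=
  let dic := s.toList.foldl
    (fun d i => if d.contains i then d.insert i (d.getD i 0 + 1) else d.insert i 1)
    (PySem.Dict.empty : PySem.Dict Char Int)
  let lst := dic.items.foldl
    (fun acc kv => if kv.2 = 1 then acc ++ [kv.1] else acc) ([] : List Char)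
  String.mk (PySem.List.sorted lst (fun x => x) false)

-- ===== PORT B =====
-- run scan over the sorted character list: split off each run of equal characters,
-- keep the character when the run has length 1 (k == 1 in Source B)
def pvRuns : List Char → List Char
  | [] => []
  | c :: rest =>
      let same := rest.takeWhile (fun x => x == c)
      let rest' := rest.dropWhile (fun x => x == c)
      if same.length = 0 then c :: pvRuns rest' else pvRuns rest'
  termination_by l => l.length
  decreasing_by
    all_goals
      simpa using Nat.lt_succ_of_le (List.Sublist.length_le (List.dropWhile_sublist _))

def solution_alt (s : String) : String :=
  String.mk (pvRuns (PySem.List.sorted s.toList (fun x => x) false))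

-- ===== PRECONDITION & SPEC =====
def Spec_solution (s : String) (out : String) : Prop := out = solution_alt s
instance (s : String) (out : String) : Decidable (Spec_solution s out) := by unfold Spec_solution; infer_instance

-- ===== CLAIM (what is proved, stated in full; the proofs are below) =====
def Claim_equal_solution : Prop := ∀ (s : String), Dom_solution s → Spec_solution s (solution s)

-- ===== LEMMAS AND PROOFS =====

-- A's counting loop is collections.Counter (the 'if i in dic' branch is exactly getD i 0 + 1)
theorem pvFold_eq_counter (l : List Char) :
    l.foldl (fun d i => if d.contains i then d.insert i (d.getD i 0 + 1) else d.insert i 1)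
      (PySem.Dict.empty : PySem.Dict Char Int) = PySem.Dict.counter l := by
  rw [← PySem.Dict.foldl_insert_getD_add_one_eq_counter]
  congr 1
  funext d i
  by_cases hc : d.contains i
  · simp [hc]
  · have h0 : d.getD i 0 = 0 := by
      rw [PySem.Dict.getD_of_not_contains]
      simpa using hc
    simp [hc, h0]

-- everything after the head of a run is strictly greater than the run's character (sortedness)
theorem pvGt (c : Char) (rest : List Char) (hs : (c :: rest).Pairwise (· ≤ ·)) :
    ∀ x ∈ rest.dropWhile (fun y => y == c), c < x := by
  intro x hx
  have hle : ∀ z ∈ rest, c ≤ z := (List.pairwise_cons.1 hs).1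
  have hsub := List.dropWhile_sublist (l := rest) (fun y => y == c)
  cases h : rest.dropWhile (fun y => y == c) with
  | nil => rw [h] at hx; simp at hx
  | cons y ys =>
    rw [h] at hx hsub
    have hy : (y == c) = false := by
      have := List.head_dropWhile_not (fun y => y == c) (l := rest) (by rw [h]; simp)
      simpa [h] using this
    have hcy : c < y :=
      lt_of_le_of_ne (hle y (hsub.mem (by simp))) (Ne.symm (by simpa using hy))
    rcases List.mem_cons.1 hx with rfl | hx'
    · exact hcy
    · have hpair : (y :: ys).Pairwise (· ≤ ·) :=
        List.Pairwise.sublist hsub (List.pairwise_cons.1 hs).2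
      exact lt_of_lt_of_le hcy ((List.pairwise_cons.1 hpair).1 x hx')

-- characters kept by the run scan of a sorted list: exactly those occurring once
theorem pvRuns_mem (t : List Char) (hs : t.Pairwise (· ≤ ·)) (d : Char) :
    d ∈ pvRuns t ↔ d ∈ t ∧ t.count d = 1 := by
  induction t using pvRuns.induct with
  | case1 => simp [pvRuns]
  | case2 c rest same rest' h ih =>
    have hrestEq : rest' = List.dropWhile (fun x => x == c) rest := rfl
    have hsameEq : same = List.takeWhile (fun x => x == c) rest := rfl
    rw [hrestEq] at ih
    rw [hsameEq] at h
    have hsame : List.takeWhile (fun x => x == c) rest = [] :=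
      List.eq_nil_of_length_eq_zero h
    have hrr : List.dropWhile (fun x => x == c) rest = rest := by
      have := List.takeWhile_append_dropWhile (p := fun x => x == c) (l := rest)
      rwa [hsame, List.nil_append] at this
    have hrt : pvRuns (c :: rest) = c :: pvRuns rest := by
      rw [pvRuns]; simp [hsame, hrr]
    have hgt : ∀ x ∈ rest, c < x := by
      have := pvGt c rest hs; rwa [hrr] at this
    have hc0 : List.count c rest = 0 :=
      List.count_eq_zero.2 (fun hmem => lt_irrefl c (hgt c hmem))
    have ih' := ih (by rw [hrr]; exact (List.pairwise_cons.1 hs).2)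
    rw [hrr] at ih'
    rw [hrt]
    by_cases hdc : d = c
    · subst hdc
      simp [hc0]
    · have hcd : (c == d) = false := by
        simpa using fun h' : c = d => hdc h'.symm
      simp [List.mem_cons, hdc, ih', List.count_cons, hcd]
  | case3 c rest same rest' h ih =>
    have hrestEq : rest' = List.dropWhile (fun x => x == c) rest := rfl
    have hsameEq : same = List.takeWhile (fun x => x == c) rest := rfl
    rw [hrestEq] at ih
    rw [hsameEq] at h
    have hrt : pvRuns (c :: rest) = pvRuns (List.dropWhile (fun x => x == c) rest) := by
      rw [pvRuns]; rw [if_neg h]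
    have hsplit : List.takeWhile (fun x => x == c) rest ++
        List.dropWhile (fun x => x == c) rest = rest :=
      List.takeWhile_append_dropWhile
    have hgt := pvGt c rest hs
    have hsameall : ∀ x ∈ List.takeWhile (fun x => x == c) rest, x = c :=
      fun x hx => by simpa using List.mem_takeWhile_imp hx
    have hpair' : (List.dropWhile (fun x => x == c) rest).Pairwise (· ≤ ·) :=
      List.Pairwise.sublist (List.dropWhile_sublist _) (List.pairwise_cons.1 hs).2
    have ih' := ih hpair'
    rw [hrt]
    have hcnt : List.count d (c :: rest)
        = List.count d (c :: List.takeWhile (fun x => x == c) rest)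
          + List.count d (List.dropWhile (fun x => x == c) rest) := by
      rw [show (c :: rest) = (c :: List.takeWhile (fun x => x == c) rest)
            ++ List.dropWhile (fun x => x == c) rest by simp [hsplit]]
      exact List.count_append
    by_cases hdc : d = c
    · subst hdc
      constructor
      · intro hmem
        exact absurd ((ih'.1 hmem).1) (fun hm => lt_irrefl d (hgt d hm))
      · rintro ⟨-, hcount⟩
        exfalso
        have h1 : List.count d (List.takeWhile (fun x => x == d) rest)
            = (List.takeWhile (fun x => x == d) rest).length :=
          List.count_eq_length.2 (fun b hb => (hsameall b hb).symm)
        have h2 : (List.takeWhile (fun x => x == d) rest).length ≠ 0 := h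
        rw [hcnt] at hcount
        simp [h1] at hcount
        omega
    · have hnotsame : d ∉ List.takeWhile (fun x => x == c) rest :=
        fun hm => hdc (hsameall d hm)
      have hd0 : List.count d (List.takeWhile (fun x => x == c) rest) = 0 :=
        List.count_eq_zero.2 hnotsame
      have hcd : (c == d) = false := by
        simpa using fun h' : c = d => hdc h'.symm
      have hmem : d ∈ c :: rest ↔ d ∈ List.dropWhile (fun x => x == c) rest := by
        constructor
        · intro hm
          rcases List.mem_cons.1 hm with rfl | hm'
          · exact absurd rfl hdc
          · rw [← hsplit] at hm'
            rcases List.mem_append.1 hm' with hm'' | hm''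
            · exact absurd (hsameall d hm'') hdc
            · exact hm''
        · intro hm
          exact List.mem_cons_of_mem _ ((List.dropWhile_sublist _).mem hm)
      rw [ih', hcnt, hmem]
      simp [List.count_cons, hcd, hd0]

theorem pvRuns_pairwise_lt (t : List Char) (hs : t.Pairwise (· ≤ ·)) :
    (pvRuns t).Pairwise (· < ·) := by
  induction t using pvRuns.induct with
  | case1 => simp [pvRuns]
  | case2 c rest same rest' h ih =>
    have hrestEq : rest' = List.dropWhile (fun x => x == c) rest := rfl
    have hsameEq : same = List.takeWhile (fun x => x == c) rest := rfl
    rw [hrestEq] at ih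
    rw [hsameEq] at h
    have hsame : List.takeWhile (fun x => x == c) rest = [] :=
      List.eq_nil_of_length_eq_zero h
    have hrr : List.dropWhile (fun x => x == c) rest = rest := by
      have := List.takeWhile_append_dropWhile (p := fun x => x == c) (l := rest)
      rwa [hsame, List.nil_append] at this
    have hrt : pvRuns (c :: rest) = c :: pvRuns rest := by
      rw [pvRuns]; simp [hsame, hrr]
    have hpair : rest.Pairwise (· ≤ ·) := (List.pairwise_cons.1 hs).2
    have hgt : ∀ x ∈ rest, c < x := by
      have := pvGt c rest hs; rwa [hrr] at this
    rw [hrt, List.pairwise_cons]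
    refine ⟨fun x hx => hgt x ((pvRuns_mem rest hpair x).1 hx).1, ?_⟩
    have := ih (by rw [hrr]; exact hpair); rwa [hrr] at this
  | case3 c rest same rest' h ih =>
    have hrestEq : rest' = List.dropWhile (fun x => x == c) rest := rfl
    have hsameEq : same = List.takeWhile (fun x => x == c) rest := rfl
    rw [hrestEq] at ih
    rw [hsameEq] at h
    have hrt : pvRuns (c :: rest) = pvRuns (List.dropWhile (fun x => x == c) rest) := by
      rw [pvRuns]; rw [if_neg h]
    rw [hrt]
    exact ih (List.Pairwise.sublist (List.dropWhile_sublist _) (List.pairwise_cons.1 hs).2)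

-- ===== VERDICT (by name: the statement is the Claim_ definition above) =====
theorem solution_spec : Claim_equal_solution := by
  intro s _
  unfold Spec_solution solution solution_alt
  dsimp only
  set l := s.toList with hl
  rw [pvFold_eq_counter, PySem.Dict.items_counter]
  rw [show (fun acc (kv : Char × Int) => if kv.2 = 1 then acc ++ [kv.1] else acc)
        = (fun acc (kv : Char × Int) =>
            if (fun kv : Char × Int => decide (kv.2 = 1)) kv = true then acc ++ [kv.1] else acc) from by
      funext acc kv; simp]
  rw [PySem.List.foldl_append_if, List.nil_append]
  rw [List.filter_map, List.map_map]
  have hfc : List.filter ((fun kv : Char × Int => decide (kv.2 = 1)) ∘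
        (fun k => (k, (List.count k l : Int)))) (PySem.Set.ofList l)
      = List.filter (fun k => decide (List.count k l = 1)) (PySem.Set.ofList l) := by
    apply List.filter_congr
    intro x _
    simp only [Function.comp_apply, Nat.cast_eq_one]
  rw [hfc]
  have hmapid : List.map ((fun kv : Char × Int => kv.1) ∘ (fun k => (k, (List.count k l : Int))))
      (List.filter (fun k => decide (List.count k l = 1)) (PySem.Set.ofList l))
      = List.filter (fun k => decide (List.count k l = 1)) (PySem.Set.ofList l) := by
    rw [show ((fun kv : Char × Int => kv.1) ∘ (fun k : Char => (k, (List.count k l : Int)))) = id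
        from funext (fun k => rfl)]
    exact List.map_id _
  rw [hmapid]
  set t := PySem.List.sorted l (fun x => x) false with ht
  have hperm : t.Perm l := PySem.List.sorted_perm l (fun x => x) false
  have hsor : t.Pairwise (· ≤ ·) := by
    simpa using PySem.List.sorted_pairwise l (fun x => x)
  apply congrArg String.mk
  apply PySem.List.sorted_eq_of_perm_of_pairwise_lt
  · rw [List.perm_ext_iff_of_nodup
      ((pvRuns_pairwise_lt t hsor).imp (fun hab => ne_of_lt hab))
      (List.Nodup.filter _ (PySem.Set.nodup_ofList l))]
    intro a
    rw [pvRuns_mem t hsor a, List.mem_filter, PySem.Set.mem_ofList]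
    rw [hperm.mem_iff, hperm.count_eq a]
    simp
  · exact pvRuns_pairwise_lt t hsor
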